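-- pv_equiv track=rewrite | github.com/iesl/diora | pytorch/diora/data/dataset.py | consolidate_word2idx
-- ===== SOURCE A (Python) =====
-- def consolidate_word2idx(word2idx_lst):
--     master_word2idx = {}
--     inverse_mapping_lst = []
--
--     for w2i in word2idx_lst:
--         old2master = {}
--         for w, idx in w2i.items():
--             if w not in master_word2idx:
--                 master_word2idx[w] = len(master_word2idx)
--             old2master[idx] = master_word2idx[w]
--         inverse_mapping_lst.append(old2master)
--
--     return master_word2idx, inverse_mapping_lst
-- ===== SOURCE B (Python) =====
-- def consolidate_word2idx(word2idx_lst):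
--     # Vocabulary = first occurrence of each word in the flattened word stream.
--     vocab = list(dict.fromkeys(w for w2i in word2idx_lst for w in w2i))
--     master_word2idx = {w: i for i, w in enumerate(vocab)}
--     inverse_mapping_lst = [
--         {idx: master_word2idx[w] for w, idx in w2i.items()} for w2i in word2idx_lst
--     ]
--     return master_word2idx, inverse_mapping_lst
-- ===== Notes on version B (the rewrite author's own statement) =====
-- stated objective: idiomatic
-- what changed: Replaces A's stateful nested loop (conditionally growing the master dict with len-based indices while remapping) by a declarative pipeline: flatten all words, dedupe with dict.fromkeys, number the vocabulary with enumerate, then remap every dict by comprehension against the finished table.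
import Mathlib
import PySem

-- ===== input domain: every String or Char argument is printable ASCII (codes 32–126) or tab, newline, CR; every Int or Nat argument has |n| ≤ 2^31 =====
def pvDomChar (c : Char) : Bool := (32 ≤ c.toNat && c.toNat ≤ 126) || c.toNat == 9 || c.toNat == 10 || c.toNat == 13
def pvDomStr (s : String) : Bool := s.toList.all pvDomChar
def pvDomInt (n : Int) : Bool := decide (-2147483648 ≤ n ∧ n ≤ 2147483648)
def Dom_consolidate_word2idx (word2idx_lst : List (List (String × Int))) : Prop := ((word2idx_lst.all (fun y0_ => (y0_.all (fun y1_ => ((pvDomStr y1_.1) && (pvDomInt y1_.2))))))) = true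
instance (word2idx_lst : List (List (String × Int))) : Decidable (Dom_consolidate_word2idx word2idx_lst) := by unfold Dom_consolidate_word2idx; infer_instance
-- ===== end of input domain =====

-- B replaces A's stateful nested loop (conditionally growing the master dict with len-based
-- indices while remapping) by a pipeline: flatten the words, dedupe (dict.fromkeys), number
-- the vocabulary with enumerate, then remap each dict against the finished table; objective: idiomatic.


-- ===== PORT A =====
-- A: one pass; for each dict the inner loop grows the master dict and records
-- old2master[idx] = master[w] at the moment of processing.  master[w] is always present
-- at that point, so the Python lookup never raises; ported as getD _ 0 (exact here).
def consolidate_word2idx (word2idx_lst : List (List (String × Int))) : (List (String × Int)) × (List (List (Int × Int))) :=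
  let r := word2idx_lst.foldl
    (fun (acc : PySem.Dict String Int × List (List (Int × Int))) (w2i : List (String × Int)) =>
      let p := w2i.foldl
        (fun (p : PySem.Dict String Int × PySem.Dict Int Int) (wi : String × Int) =>
          let m2 := if p.1.contains wi.1 then p.1 else p.1.insert wi.1 (p.1.size : Int)
          (m2, p.2.insert wi.2 (m2.getD wi.1 0)))
        (acc.1, (PySem.Dict.empty : PySem.Dict Int Int))
      (p.1, acc.2 ++ [p.2.items]))
    ((PySem.Dict.empty : PySem.Dict String Int), ([] : List (List (Int × Int))))
  (r.1.items, r.2)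

-- ===== PORT B =====
-- B: vocab = list(dict.fromkeys(flattened words))  →  PySem.List.dedup of the flattened word list;
-- master = {w: i for i, w in enumerate(vocab)}; remaps by comprehension against master.
-- master[w] is always present in the remap comprehension; ported as getD _ 0 (exact here).
def consolidate_word2idx_alt (word2idx_lst : List (List (String × Int))) : (List (String × Int)) × (List (List (Int × Int))) :=
  let vocab := PySem.List.dedup (word2idx_lst.flatMap (fun w2i => w2i.map Prod.fst))
  let master := (PySem.List.enumerate vocab 0).foldl
    (fun (d : PySem.Dict String Int) (p : Int × String) => d.insert p.2 p.1) PySem.Dict.empty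
  (master.items,
   word2idx_lst.map (fun w2i =>
     (w2i.foldl (fun (o : PySem.Dict Int Int) (wi : String × Int) =>
        o.insert wi.2 (master.getD wi.1 0)) PySem.Dict.empty).items))

-- ===== PRECONDITION & SPEC =====
def Spec_consolidate_word2idx (word2idx_lst : List (List (String × Int))) (out : (List (String × Int)) × (List (List (Int × Int)))) : Prop := out = consolidate_word2idx_alt word2idx_lst
instance (word2idx_lst : List (List (String × Int))) (out : (List (String × Int)) × (List (List (Int × Int)))) : Decidable (Spec_consolidate_word2idx word2idx_lst out) := by unfold Spec_consolidate_word2idx; infer_instance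

-- ===== CLAIM (what is proved, stated in full; the proofs are below) =====
def Claim_equal_consolidate_word2idx : Prop := ∀ (word2idx_lst : List (List (String × Int))), Dom_consolidate_word2idx word2idx_lst → Spec_consolidate_word2idx word2idx_lst (consolidate_word2idx word2idx_lst)

-- ===== LEMMAS AND PROOFS =====

-- A's way of growing the master by one word.
def pvStep (m : PySem.Dict String Int) (w : String) : PySem.Dict String Int :=
  if m.contains w then m else m.insert w (m.size : Int)

-- A's inner loop restricted to the master component.
def pvMasterStep (m : PySem.Dict String Int) (w2i : List (String × Int)) : PySem.Dict String Int :=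
  w2i.foldl (fun m wi => pvStep m wi.1) m

-- B's master built from an enumerated vocabulary.
def pvEnumFold (v : List String) : PySem.Dict String Int :=
  (PySem.List.enumerate v 0).foldl
    (fun (d : PySem.Dict String Int) (p : Int × String) => d.insert p.2 p.1) PySem.Dict.empty

-- "M preserves every binding of m" — inserts of fresh keys only ever extend the master.
def pvExt (m M : PySem.Dict String Int) : Prop :=
  ∀ w v, m.get? w = some v → M.get? w = some v

theorem pvExt_refl (m : PySem.Dict String Int) : pvExt m m := fun _ _ h => h

theorem pvExt_trans {a b c : PySem.Dict String Int} (h1 : pvExt a b) (h2 : pvExt b c) : pvExt a c :=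
  fun w v h => h2 w v (h1 w v h)

theorem pvExt_step (m : PySem.Dict String Int) (wi : String × Int) :
    pvExt m (pvStep m wi.1) := by
  intro w v h
  unfold pvStep
  split_ifs with hc
  · exact h
  · rcases eq_or_ne w wi.1 with rfl | hne
    · rw [PySem.Dict.contains_eq_isSome_get?, h] at hc; simp at hc
    · rw [PySem.Dict.get?_insert_of_ne _ _ hne]; exact h

theorem pvExt_masterStep (m : PySem.Dict String Int) (w2i : List (String × Int)) :
    pvExt m (pvMasterStep m w2i) := by
  induction w2i generalizing m with
  | nil => exact pvExt_refl m
  | cons wi rest ih => exact pvExt_trans (pvExt_step m wi) (ih _)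

theorem pvExt_masterFold (m : PySem.Dict String Int) (l : List (List (String × Int))) :
    pvExt m (l.foldl pvMasterStep m) := by
  induction l generalizing m with
  | nil => exact pvExt_refl m
  | cons w2i rest ih => exact pvExt_trans (pvExt_masterStep m w2i) (ih _)

-- A's inner loop = its master component, plus B's remap against any extension M.
theorem pvInner (w2i : List (String × Int)) (m : PySem.Dict String Int)
    (o : PySem.Dict Int Int) (M : PySem.Dict String Int)
    (hM : pvExt (pvMasterStep m w2i) M) :
    w2i.foldl
      (fun (p : PySem.Dict String Int × PySem.Dict Int Int) (wi : String × Int) =>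
        let m2 := if p.1.contains wi.1 then p.1 else p.1.insert wi.1 (p.1.size : Int)
        (m2, p.2.insert wi.2 (m2.getD wi.1 0)))
      (m, o)
    = (pvMasterStep m w2i, w2i.foldl (fun o wi => o.insert wi.2 (M.getD wi.1 0)) o) := by
  induction w2i generalizing m o with
  | nil => rfl
  | cons wi rest ih =>
      have hm2 : pvStep m wi.1 = if m.contains wi.1 then m else m.insert wi.1 (m.size : Int) := rfl
      set m2 := pvStep m wi.1 with hset
      have hstep : pvMasterStep m (wi :: rest) = pvMasterStep m2 rest := rfl
      have hsome : ∃ v, m2.get? wi.1 = some v := by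
        by_cases hc : m.contains wi.1
        · rw [PySem.Dict.contains_eq_isSome_get?] at hc
          rcases Option.isSome_iff_exists.mp hc with ⟨v, hv⟩
          exact ⟨v, by simp [hset, pvStep, PySem.Dict.contains_eq_isSome_get?, hv]⟩
        · exact ⟨(m.size : Int), by simp [hset, pvStep, hc, PySem.Dict.get?_insert_self]⟩
      rcases hsome with ⟨v, hv⟩
      have hMv : M.get? wi.1 = some v := by
        apply hM
        apply pvExt_masterStep m2 rest
        exact hv
      have hget : m2.getD wi.1 0 = M.getD wi.1 0 := by
        rw [PySem.Dict.getD_eq_get?_getD, PySem.Dict.getD_eq_get?_getD, hv, hMv]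
      simp only [List.foldl_cons]
      rw [hstep] at hM
      have := ih m2 (o.insert wi.2 (m2.getD wi.1 0)) hM
      simp only [← hm2] at this ⊢
      rw [this, hget, hstep]

-- A's outer loop from (m, acc) = (A's master fold, acc ++ B's remaps against any extension M).
theorem pvOuter (l : List (List (String × Int))) (m : PySem.Dict String Int)
    (acc : List (List (Int × Int))) (M : PySem.Dict String Int)
    (hM : pvExt (l.foldl pvMasterStep m) M) :
    l.foldl
      (fun (acc : PySem.Dict String Int × List (List (Int × Int))) (w2i : List (String × Int)) =>
        let p := w2i.foldl
          (fun (p : PySem.Dict String Int × PySem.Dict Int Int) (wi : String × Int) =>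
            let m2 := if p.1.contains wi.1 then p.1 else p.1.insert wi.1 (p.1.size : Int)
            (m2, p.2.insert wi.2 (m2.getD wi.1 0)))
          (acc.1, (PySem.Dict.empty : PySem.Dict Int Int))
        (p.1, acc.2 ++ [p.2.items]))
      (m, acc)
    = (l.foldl pvMasterStep m,
       acc ++ l.map (fun w2i =>
         (w2i.foldl (fun (o : PySem.Dict Int Int) wi => o.insert wi.2 (M.getD wi.1 0))
           PySem.Dict.empty).items)) := by
  induction l generalizing m acc with
  | nil => simp
  | cons w2i rest ih =>
      have hstep : pvExt (pvMasterStep m w2i) M :=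
        pvExt_trans (pvExt_masterFold (pvMasterStep m w2i) rest) hM
      simp only [List.foldl_cons]
      rw [pvInner w2i m PySem.Dict.empty M hstep]
      rw [ih (pvMasterStep m w2i) _ hM]
      simp

-- contains of the enumerate-fold from any start and initial dict.
theorem pvEnumFoldFrom_contains (v : List String) (d : PySem.Dict String Int) (s : Int) (w : String) :
    ((PySem.List.enumerate v s).foldl
      (fun (d : PySem.Dict String Int) (p : Int × String) => d.insert p.2 p.1) d).contains w
    = (d.contains w || decide (w ∈ v)) := by
  induction v generalizing d s with
  | nil => simp [PySem.List.enumerate_nil]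
  | cons x xs ih =>
      rw [PySem.List.enumerate_cons]
      simp only [List.foldl_cons]
      rw [ih]
      rw [PySem.Dict.contains_insert]
      by_cases h : w = x
      · simp [h]
      · simp only [List.mem_cons, h, false_or]
        rw [beq_eq_false_iff_ne.mpr h]
        simp

-- size of the enumerate-fold when the new keys are fresh and distinct.
theorem pvEnumFoldFrom_size (v : List String) (d : PySem.Dict String Int) (s : Int)
    (hnd : v.Nodup) (hfresh : ∀ w ∈ v, d.contains w = false) :
    ((PySem.List.enumerate v s).foldl
      (fun (d : PySem.Dict String Int) (p : Int × String) => d.insert p.2 p.1) d).size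
    = d.size + v.length := by
  induction v generalizing d s with
  | nil => simp [PySem.List.enumerate_nil]
  | cons x xs ih =>
      rw [PySem.List.enumerate_cons]
      simp only [List.foldl_cons]
      rw [ih (d.insert x s) (s + 1) hnd.of_cons]
      · rw [PySem.Dict.size_insert, hfresh x (by simp)]
        simp; omega
      · intro w hw
        rw [PySem.Dict.contains_insert]
        have hne : w ≠ x := fun h => (List.nodup_cons.mp hnd).1 (h ▸ hw)
        simp [hne, hfresh w (List.mem_cons_of_mem _ hw)]

-- Appending one fresh word to the vocabulary = one insert at index v.length.
theorem pvEnumFold_append (v : List String) (w : String) :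
    pvEnumFold (v ++ [w]) = (pvEnumFold v).insert w (v.length : Int) := by
  unfold pvEnumFold
  rw [PySem.List.enumerate_append, List.foldl_append]
  simp [PySem.List.enumerate_cons, PySem.List.enumerate_nil]

-- The heart of the equivalence: A's incremental master over a word stream
-- equals B's enumerate-fold over the deduplicated stream.
theorem pvStream (ws : List String) :
    ws.foldl pvStep PySem.Dict.empty = pvEnumFold (PySem.List.dedup ws) := by
  induction ws using List.reverseRecOn with
  | nil => rfl
  | append_singleton ws w ih =>
      rw [List.foldl_append, List.foldl_cons, List.foldl_nil, ih]
      have hdd : PySem.List.dedup (ws ++ [w])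
          = if w ∈ PySem.List.dedup ws then PySem.List.dedup ws
            else PySem.List.dedup ws ++ [w] := by
        simp only [PySem.List.dedup_eq_ofList]
        rw [PySem.Set.ofList_append_singleton, PySem.Set.add_eq_ite]
      have hcont : (pvEnumFold (PySem.List.dedup ws)).contains w
          = decide (w ∈ PySem.List.dedup ws) := by
        unfold pvEnumFold
        rw [pvEnumFoldFrom_contains]
        simp
      unfold pvStep
      rw [hcont, hdd]
      by_cases hm : w ∈ PySem.List.dedup ws
      · simp only [hm, decide_true, if_true]
      · have hsize : (pvEnumFold (PySem.List.dedup ws)).size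
            = (PySem.List.dedup ws).length := by
          unfold pvEnumFold
          rw [pvEnumFoldFrom_size _ _ _ (by simp [PySem.List.dedup_eq_ofList, PySem.Set.nodup_ofList]) (by intro _ _; simp)]
          simp
        have hb : ¬(decide (w ∈ PySem.List.dedup ws) = true) := by simpa using hm
        rw [if_neg hb, if_neg hm, pvEnumFold_append, hsize]

-- A's master fold over the list of dicts is the fold of pvStep over the flattened word stream.
theorem pvMasterFold_flat (l : List (List (String × Int))) :
    l.foldl pvMasterStep PySem.Dict.empty
    = (l.flatMap (fun w2i => w2i.map Prod.fst)).foldl pvStep PySem.Dict.empty := by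
  rw [List.foldl_flatMap]
  apply PySem.List.foldl_congr_mem
  intro m w2i _
  unfold pvMasterStep
  rw [List.foldl_map]

-- ===== VERDICT (by name: the statement is the Claim_ definition above) =====
theorem consolidate_word2idx_spec : Claim_equal_consolidate_word2idx := by
  intro l _
  show consolidate_word2idx l = consolidate_word2idx_alt l
  unfold consolidate_word2idx consolidate_word2idx_alt
  have hmaster : l.foldl pvMasterStep PySem.Dict.empty
      = pvEnumFold (PySem.List.dedup (l.flatMap (fun w2i => w2i.map Prod.fst))) := by
    rw [pvMasterFold_flat, pvStream]
  have h := pvOuter l PySem.Dict.empty []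
    (pvEnumFold (PySem.List.dedup (l.flatMap (fun w2i => w2i.map Prod.fst))))
    (by rw [hmaster]; exact pvExt_refl _)
  rw [h]
  rw [hmaster]
  simp [pvEnumFold]
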